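-- pv_equiv track=rewrite | github.com/ChagayToubin/Mongo-test-21-8 | app/processor.py | find_rasrest_word
-- ===== SOURCE A (Python) =====
-- from collections import Counter
--
-- def find_rasrest_word(text):
--     words = text.split()
--     if not words:
--         return None
--     counts = Counter(words)
--     min_freq = min(counts.values())
--     rarest = [w for w, c in counts.items() if c == min_freq]
--     return rarest[0]
-- ===== SOURCE B (Python) =====
-- def find_rasrest_word(text):
--     words = text.split()
--     best = None
--     seen = []
--     for w in words:
--         if w not in seen:
--             seen.append(w)
--             c = words.count(w)
--             if best is None or c < best[0]:
--                 best = (c, w)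
--     return best[1] if best is not None else None
-- ===== Notes on version B (the rewrite author's own statement) =====
-- stated objective: alternative
-- what changed: B drops the frequency dictionary entirely: one pass over the words keeps a seen-list and a running (count, word) minimum, computing each first occurrence's frequency by a direct list.count scan, instead of A's Counter build + min of values + filtering comprehension.
import Mathlib
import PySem

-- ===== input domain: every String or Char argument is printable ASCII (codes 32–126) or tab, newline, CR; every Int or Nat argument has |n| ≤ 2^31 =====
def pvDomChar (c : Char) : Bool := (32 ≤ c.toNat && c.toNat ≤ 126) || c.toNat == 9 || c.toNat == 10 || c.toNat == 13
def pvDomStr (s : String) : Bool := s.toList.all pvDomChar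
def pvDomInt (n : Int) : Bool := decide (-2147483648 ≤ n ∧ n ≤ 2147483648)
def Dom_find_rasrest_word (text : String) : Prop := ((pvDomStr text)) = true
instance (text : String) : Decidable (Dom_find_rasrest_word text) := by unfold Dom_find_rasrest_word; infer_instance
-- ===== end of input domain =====

-- B drops the frequency dictionary: one pass keeps a seen-list and a running (count, word)
-- minimum, computing each first occurrence's frequency with a direct list.count scan (alternative).

-- ===== PORT A =====
def find_rasrest_word (text : String) : Option String :=
  let words := PySem.Str.split₀ text
  if words = [] then none
  else
    let counts := PySem.Dict.counter words
    match PySem.List.min? counts.values (fun v => v) with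
    | none => none  -- unreachable: min([]) would raise, but counts is nonempty here
    | some min_freq =>
      let rarest := (counts.items.filter (fun p => p.2 == min_freq)).map (·.1)
      PySem.List.pyGet? rarest 0

-- ===== PORT B =====
def find_rasrest_word_alt (text : String) : Option String :=
  let words := PySem.Str.split₀ text
  let st := words.foldl
    (fun (st : List String × Option (Int × String)) w =>
      if st.1.contains w then st
      else
        let c := PySem.List.count words w
        let best :=
          match st.2 with
          | none => some (c, w)
          | some b => if c < b.1 then some (c, w) else some b
        (st.1 ++ [w], best))
    ([], none)
  st.2.map (·.2)

-- ===== PRECONDITION & SPEC =====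
def Spec_find_rasrest_word (text : String) (out : Option String) : Prop := out = find_rasrest_word_alt text
instance (text : String) (out : Option String) : Decidable (Spec_find_rasrest_word text out) := by unfold Spec_find_rasrest_word; infer_instance

-- ===== CLAIM (what is proved, stated in full; the proofs are below) =====
def Claim_equal_find_rasrest_word : Prop := ∀ (text : String), Dom_find_rasrest_word text → Spec_find_rasrest_word text (find_rasrest_word text)

-- ===== LEMMAS AND PROOFS =====

-- the running-first-minimum over a list of candidates
def pvArgmin (f : String → Int) (x : String) (ys : List String) : String :=
  ys.foldl (fun m y => if f y < f m then y else m) x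

theorem pvArgmin_nil (f : String → Int) (x : String) : pvArgmin f x [] = x := rfl

theorem pvArgmin_cons (f : String → Int) (x y : String) (t : List String) :
    pvArgmin f x (y :: t) = pvArgmin f (if f y < f x then y else x) t := rfl

theorem min?_id_step (a b : Int) (t : List Int) :
    PySem.List.min? (a :: b :: t) (fun v => v) =
      PySem.List.min? ((if b < a then b else a) :: t) (fun v => v) := by
  simp only [PySem.List.min?, List.foldl_cons]
  congr 1
  split <;> rfl

theorem pvArgmin_le (f : String → Int) (ys : List String) : ∀ (x : String),
    f (pvArgmin f x ys) ≤ f x ∧ ∀ y ∈ ys, f (pvArgmin f x ys) ≤ f y := by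
  induction ys with
  | nil => intro x; simp [pvArgmin_nil]
  | cons y t ih =>
    intro x
    rw [pvArgmin_cons]
    by_cases hc : f y < f x
    · simp only [if_pos hc]
      rcases ih y with ⟨h1, h2⟩
      refine ⟨by omega, ?_⟩
      intro z hz
      rcases List.mem_cons.mp hz with rfl | hz
      · exact h1
      · exact h2 z hz
    · simp only [if_neg hc]
      rcases ih x with ⟨h1, h2⟩
      refine ⟨h1, ?_⟩
      intro z hz
      rcases List.mem_cons.mp hz with rfl | hz
      · omega
      · exact h2 z hz

-- the argmin is the FIRST element of x :: ys attaining its value of f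
theorem head_filter_argmin (f : String → Int) (ys : List String) : ∀ (x : String),
    ((x :: ys).filter (fun z => f z == f (pvArgmin f x ys))).head? =
      some (pvArgmin f x ys) := by
  induction ys with
  | nil => intro x; simp [pvArgmin_nil]
  | cons y t ih =>
    intro x
    rw [pvArgmin_cons]
    by_cases hc : f y < f x
    · simp only [if_pos hc]
      have h1 := (pvArgmin_le f t y).1
      have hx : ¬ ((f x == f (pvArgmin f y t)) = true) := by
        simp only [beq_iff_eq]; omega
      rw [List.filter_cons, if_neg hx]
      exact ih y
    · simp only [if_neg hc]
      have h1 := (pvArgmin_le f t x).1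
      have hthis := ih x
      by_cases hx : f x = f (pvArgmin f x t)
      · have hxm : pvArgmin f x t = x := by
          rw [List.filter_cons, if_pos (by simpa using hx)] at hthis
          exact (Option.some_inj.mp hthis).symm
        rw [hxm]
        rw [List.filter_cons, if_pos (by simp)]
        rfl
      · have hy : ¬ ((f y == f (pvArgmin f x t)) = true) := by
          simp only [beq_iff_eq]; omega
        have hx' : ¬ ((f x == f (pvArgmin f x t)) = true) := by simpa using hx
        rw [List.filter_cons, if_neg hx'] at hthis
        rw [List.filter_cons, if_neg hx', List.filter_cons, if_neg hy]
        exact hthis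

-- the minimum of the mapped counts is f of the argmin
theorem min?_map_eq (f : String → Int) (ys : List String) : ∀ (x : String),
    PySem.List.min? ((x :: ys).map f) (fun v => v) = some (f (pvArgmin f x ys)) := by
  induction ys with
  | nil => intro x; rfl
  | cons y t ih =>
    intro x
    simp only [List.map_cons]
    rw [min?_id_step, ← apply_ite f, ← List.map_cons]
    rw [ih, pvArgmin_cons]

theorem head?_pyGet (l : List String) (z : String) (h : l.head? = some z) :
    PySem.List.pyGet? l 0 = some z := by
  cases l with
  | nil => simp at h
  | cons a t =>
    simp only [List.head?_cons, Option.some_inj] at h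
    simp [PySem.List.pyGet?, PySem.List.pyIdx?, h]

-- ==== B-side machinery: splitting B's fold into "new elements" and a best-accumulator ====

-- the best-update step of B, on its own
def pvBStep (f : String → Int) (b : Option (Int × String)) (w : String) : Option (Int × String) :=
  match b with
  | none => some (f w, w)
  | some p => if f w < p.1 then some (f w, w) else some p

-- the elements of ws that are new relative to seen-list s, in order
def pvNews (s : List String) : List String → List String
  | [] => []
  | w :: t => if s.contains w then pvNews s t else w :: pvNews (s ++ [w]) t

-- B's combined fold = fold of pvBStep over the new elements (second component)
theorem snd_fold_eq (f : String → Int) (ws : List String) : ∀ (s : List String) (b : Option (Int × String)),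
    (ws.foldl
      (fun (st : List String × Option (Int × String)) w =>
        if st.1.contains w then st
        else (st.1 ++ [w], pvBStep f st.2 w))
      (s, b)).2 = (pvNews s ws).foldl (pvBStep f) b := by
  induction ws with
  | nil => intro s b; rfl
  | cons w t ih =>
    intro s b
    simp only [List.foldl_cons, pvNews]
    by_cases h : s.contains w
    · simp only [if_pos h]
      exact ih s b
    · simp only [if_neg h]
      rw [ih, List.foldl_cons]

-- the seen-list recursion enumerates exactly the set of ws (relative to s)
theorem append_pvNews (ws : List String) : ∀ (s : List String),
    s ++ pvNews s ws = PySem.Set.update s ws := by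
  induction ws with
  | nil => intro s; simp [pvNews, PySem.Set.update]
  | cons w t ih =>
    intro s
    rw [PySem.Set.update_cons]
    by_cases h : s.contains w
    · have hmem : w ∈ s := by simpa using h
      have hadd : PySem.Set.add s w = s := by
        simp [PySem.Set.add, hmem]
      simp only [pvNews, if_pos h, hadd]
      exact ih s
    · have hmem : w ∉ s := by simpa using h
      have hadd : PySem.Set.add s w = s ++ [w] := by
        simp [PySem.Set.add, hmem]
      simp only [pvNews, if_neg h, hadd]
      rw [← ih (s ++ [w])]
      simp

theorem pvNews_nil_eq (ws : List String) : pvNews [] ws = PySem.Set.ofList ws := by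
  have := append_pvNews ws []
  simpa [PySem.Set.update_nil_left] using this

-- folding pvBStep from a seeded best is the running argmin
theorem foldl_bstep_some (f : String → Int) (ys : List String) : ∀ (m : String),
    ys.foldl (pvBStep f) (some (f m, m)) = some (f (pvArgmin f m ys), pvArgmin f m ys) := by
  induction ys with
  | nil => intro m; simp [pvArgmin_nil]
  | cons y t ih =>
    intro m
    rw [List.foldl_cons, pvArgmin_cons]
    have hstep : pvBStep f (some (f m, m)) y =
        some (f (if f y < f m then y else m), if f y < f m then y else m) := by
      unfold pvBStep
      by_cases h : f y < f m
      · simp [h]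
      · simp [h]
    rw [hstep, ih]

theorem foldl_bstep_cons (f : String → Int) (x : String) (ys : List String) :
    (x :: ys).foldl (pvBStep f) none = some (f (pvArgmin f x ys), pvArgmin f x ys) := by
  rw [List.foldl_cons]
  have : pvBStep f none x = some (f x, x) := rfl
  rw [this, foldl_bstep_some]

-- ===== VERDICT (by name: the statement is the Claim_ definition above) =====
theorem find_rasrest_word_spec : Claim_equal_find_rasrest_word := by
  intro text _
  unfold Spec_find_rasrest_word
  simp only [find_rasrest_word, find_rasrest_word_alt]
  set words := PySem.Str.split₀ text with hw
  set f : String → Int := fun k => ((words.count k : Nat) : Int) with hf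
  have hcount : (fun (st : List String × Option (Int × String)) w =>
      if st.1.contains w then st
      else
        let c := PySem.List.count words w
        let best :=
          match st.2 with
          | none => some (c, w)
          | some b => if c < b.1 then some (c, w) else some b
        (st.1 ++ [w], best)) =
      (fun (st : List String × Option (Int × String)) w =>
        if st.1.contains w then st
        else (st.1 ++ [w], pvBStep f st.2 w)) := by
    funext st w
    simp only [pvBStep, PySem.List.count_eq, hf]
  rw [hcount]
  by_cases hnil : words = []
  · simp only [hnil]
    simp
  · simp only [if_neg hnil]
    have hitems := PySem.Dict.items_counter (κ := String) words
    have hkeys := PySem.Dict.keys_counter (κ := String) words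
    obtain ⟨d, dt, hds⟩ : ∃ d dt, (PySem.Set.ofList words : List String) = d :: dt := by
      cases hsl : (PySem.Set.ofList words : List String) with
      | nil =>
        exfalso
        rcases List.exists_mem_of_ne_nil words hnil with ⟨w, hwmem⟩
        have : w ∈ PySem.Set.ofList words := (PySem.Set.mem_ofList words w).mpr hwmem
        rw [hsl] at this
        simp at this
      | cons a t => exact ⟨a, t, rfl⟩
    -- A's value
    have hvals : (PySem.Dict.counter words).values = (d :: dt).map f := by
      unfold PySem.Dict.values
      rw [hitems, hds, List.map_map]
      rfl
    rw [hvals, min?_map_eq]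
    dsimp only
    have hfilter : ((PySem.Dict.counter words).items.filter
          (fun p => p.2 == f (pvArgmin f d dt))).map (·.1) =
        (d :: dt).filter (fun z => f z == f (pvArgmin f d dt)) := by
      rw [hitems, hds, List.filter_map, List.map_map]
      simp only [Function.comp_def, List.map_id']
      rfl
    rw [hfilter, head?_pyGet _ _ (head_filter_argmin f _ d)]
    -- B's value
    rw [snd_fold_eq f words [] none, pvNews_nil_eq, hds, foldl_bstep_cons]
    rfl
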